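-- pv_equiv track=rewrite | github.com/stranma/Vizier | libs/core/vizier/core/retrospective/runtime.py | _parse_proposals
-- ===== SOURCE A (Python) =====
-- def _parse_proposals(content: str) -> list[tuple[str, str]]:
--     """Parse PROPOSAL: blocks from LLM response.
--
--     :param content: LLM response text.
--     :returns: List of (title, body) tuples.
--     """
--     proposals: list[tuple[str, str]] = []
--     lines = content.split("\n")
--     i = 0
--
--     while i < len(lines):
--         stripped = lines[i].strip()
--         if stripped.upper().startswith("PROPOSAL:"):
--             title = stripped[len("PROPOSAL:") :].strip()
--             body_lines: list[str] = []
--             i += 1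
--             while i < len(lines):
--                 next_line = lines[i].strip()
--                 if next_line.upper().startswith("PROPOSAL:") or next_line.upper().startswith("LEARNING:"):
--                     break
--                 body_lines.append(lines[i])
--                 i += 1
--             body = "\n".join(body_lines).strip()
--             if title:
--                 proposals.append((title, body))
--         else:
--             i += 1
--
--     return proposals
-- ===== SOURCE B (Python) =====
-- def _parse_proposals(content: str) -> list[tuple[str, str]]:
--     """Parse PROPOSAL: blocks from LLM response (flat single-pass state machine)."""
--     proposals: list[tuple[str, str]] = []
--     current_title = None  # None = not inside a proposal block
--     body_lines: list[str] = []
--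
--     def flush():
--         if current_title:
--             proposals.append((current_title, "\n".join(body_lines).strip()))
--
--     for line in content.split("\n"):
--         stripped = line.strip()
--         marker = stripped.upper()
--         if marker.startswith("PROPOSAL:"):
--             flush()
--             current_title = stripped[len("PROPOSAL:"):].strip()
--             body_lines = []
--         elif marker.startswith("LEARNING:"):
--             flush()
--             current_title = None
--             body_lines = []
--         elif current_title is not None:
--             body_lines.append(line)
--     flush()
--     return proposals
-- ===== Notes on version B (the rewrite author's own statement) =====
-- stated objective: simpler
-- what changed: Replaced A's nested while loops over an explicit line index with a single flat for-loop over the lines maintaining (current_title, body_lines) state and one flush helper.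
import Mathlib
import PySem

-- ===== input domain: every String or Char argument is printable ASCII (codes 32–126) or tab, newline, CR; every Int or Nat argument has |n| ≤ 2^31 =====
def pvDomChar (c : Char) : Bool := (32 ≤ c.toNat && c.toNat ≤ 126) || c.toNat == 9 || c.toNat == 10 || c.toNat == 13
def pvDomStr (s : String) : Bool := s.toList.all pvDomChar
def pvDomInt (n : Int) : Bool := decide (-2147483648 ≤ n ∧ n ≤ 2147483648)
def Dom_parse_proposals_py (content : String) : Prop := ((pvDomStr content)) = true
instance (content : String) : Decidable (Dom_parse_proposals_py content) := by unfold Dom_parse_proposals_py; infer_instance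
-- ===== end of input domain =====

-- B is a simpler decomposition: one flat pass with (current_title, body_lines) state and a
-- single flush helper, instead of A's nested while loops over an index.

-- ===== PORT A =====
-- inner while loop of A: collect raw body lines until a PROPOSAL:/LEARNING: marker;
-- returns (body_lines, remaining lines starting at the marker, if any)
def pvInnerA (lines : List String) : List String × List String :=
  match lines with
  | [] => ([], [])
  | l :: rest =>
    if PySem.Str.startswith (PySem.Str.upper (PySem.Str.strip l)) "PROPOSAL:"
       || PySem.Str.startswith (PySem.Str.upper (PySem.Str.strip l)) "LEARNING:" then
      ([], l :: rest)
    else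
      ((pvInnerA rest).1.cons l, (pvInnerA rest).2)

theorem pvInnerA_len (lines : List String) : (pvInnerA lines).2.length ≤ lines.length := by
  induction lines with
  | nil => simp [pvInnerA]
  | cons l rest ih =>
    rw [pvInnerA]
    split
    · simp
    · simpa using Nat.le_succ_of_le ih

-- outer while loop of A
def pvOuterA (lines : List String) : List (String × String) :=
  match lines with
  | [] => []
  | l :: rest =>
    if PySem.Str.startswith (PySem.Str.upper (PySem.Str.strip l)) "PROPOSAL:" then
      (if PySem.Str.strip (PySem.Str.slice (PySem.Str.strip l) (some 9) none) ≠ "" then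
        [(PySem.Str.strip (PySem.Str.slice (PySem.Str.strip l) (some 9) none),
          PySem.Str.strip (PySem.Str.join "\n" (pvInnerA rest).1))]
       else []) ++ pvOuterA (pvInnerA rest).2
    else
      pvOuterA rest
  termination_by lines.length
  decreasing_by
    · exact Nat.lt_succ_of_le (pvInnerA_len rest)
    · simp

-- content.split("\n"): the separator is the nonempty literal "\n", so split? is always `some`
def parse_proposals_py (content : String) : List (String × String) :=
  pvOuterA ((PySem.Str.split? content "\n").getD [])

-- ===== PORT B =====
-- flush(): append the pending (title, body) to the accumulator when the title is truthy
def pvFlushB (acc : List (String × String)) (cur : Option String) (body : List String) :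
    List (String × String) :=
  match cur with
  | none => acc
  | some t => if t ≠ "" then acc ++ [(t, PySem.Str.strip (PySem.Str.join "\n" body))] else acc

-- the single flat for-loop of B, carrying (current_title, body_lines, proposals)
def pvLoopB (lines : List String) (cur : Option String) (body : List String)
    (acc : List (String × String)) : List (String × String) :=
  match lines with
  | [] => pvFlushB acc cur body
  | l :: rest =>
    if PySem.Str.startswith (PySem.Str.upper (PySem.Str.strip l)) "PROPOSAL:" then
      pvLoopB rest (some (PySem.Str.strip (PySem.Str.slice (PySem.Str.strip l) (some 9) none)))
        [] (pvFlushB acc cur body)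
    else if PySem.Str.startswith (PySem.Str.upper (PySem.Str.strip l)) "LEARNING:" then
      pvLoopB rest none [] (pvFlushB acc cur body)
    else
      match cur with
      | some _ => pvLoopB rest cur (body ++ [l]) acc
      | none => pvLoopB rest cur body acc

def parse_proposals_py_alt (content : String) : List (String × String) :=
  pvLoopB ((PySem.Str.split? content "\n").getD []) none [] []

-- ===== PRECONDITION & SPEC =====
def Spec_parse_proposals_py (content : String) (out : List (String × String)) : Prop := out = parse_proposals_py_alt content
instance (content : String) (out : List (String × String)) : Decidable (Spec_parse_proposals_py content out) := by unfold Spec_parse_proposals_py; infer_instance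

-- ===== CLAIM (what is proved, stated in full; the proofs are below) =====
def Claim_equal_parse_proposals_py : Prop := ∀ (content : String), Dom_parse_proposals_py content → Spec_parse_proposals_py content (parse_proposals_py content)

-- ===== LEMMAS AND PROOFS =====

theorem pvOuterA_cons (l : String) (rest : List String) :
    pvOuterA (l :: rest) =
      if PySem.Str.startswith (PySem.Str.upper (PySem.Str.strip l)) "PROPOSAL:" then
        (if PySem.Str.strip (PySem.Str.slice (PySem.Str.strip l) (some 9) none) ≠ "" then
          [(PySem.Str.strip (PySem.Str.slice (PySem.Str.strip l) (some 9) none),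
            PySem.Str.strip (PySem.Str.join "\n" (pvInnerA rest).1))]
         else []) ++ pvOuterA (pvInnerA rest).2
      else pvOuterA rest := by
  rw [pvOuterA]

-- combined invariant: B's flat loop from state (none / some t, body, acc) computes what A's
-- nested loops compute from the same point
theorem pvLoop_eq (lines : List String) :
    (∀ body acc, pvLoopB lines none body acc = acc ++ pvOuterA lines) ∧
    (∀ t body acc, pvLoopB lines (some t) body acc =
      pvFlushB acc (some t) (body ++ (pvInnerA lines).1) ++ pvOuterA (pvInnerA lines).2) := by
  induction lines with
  | nil =>
    constructor
    · intro body acc; rw [pvLoopB, pvOuterA]; simp [pvFlushB]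
    · intro t body acc; rw [pvLoopB, pvInnerA, pvOuterA]; simp
  | cons l rest ih =>
    cases hp : PySem.Str.startswith (PySem.Str.upper (PySem.Str.strip l)) "PROPOSAL:" with
    | true =>
      constructor
      · intro body acc
        rw [pvLoopB, pvOuterA_cons]
        simp only [hp, if_true, ih.2, pvFlushB, List.nil_append]
        split_ifs <;> simp
      · intro t body acc
        rw [pvLoopB, pvInnerA]
        simp only [hp, Bool.true_or, if_true]
        rw [pvOuterA_cons]
        simp only [hp, if_true, ih.2, pvFlushB, List.nil_append, List.append_nil]
        split_ifs <;> simp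
    | false =>
      cases hl : PySem.Str.startswith (PySem.Str.upper (PySem.Str.strip l)) "LEARNING:" with
      | true =>
        constructor
        · intro body acc
          rw [pvLoopB, pvOuterA_cons]
          simp only [hp, hl, Bool.false_eq_true, if_false, if_true, ih.1, pvFlushB]
        · intro t body acc
          rw [pvLoopB, pvInnerA]
          simp only [hp, hl, Bool.false_or, Bool.false_eq_true, if_false, if_true]
          rw [pvOuterA_cons]
          simp only [hp, Bool.false_eq_true, if_false, ih.1, List.append_nil]
      | false =>
        constructor
        · intro body acc
          rw [pvLoopB, pvOuterA_cons]
          simp only [hp, hl, Bool.false_eq_true, if_false, ih.1]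
        · intro t body acc
          rw [pvLoopB, pvInnerA]
          simp only [hp, hl, Bool.false_or, Bool.false_eq_true, if_false, ih.2, pvFlushB]
          split_ifs <;> simp [List.append_assoc]

-- ===== VERDICT (by name: the statement is the Claim_ definition above) =====
theorem parse_proposals_py_spec : Claim_equal_parse_proposals_py := by
  intro content _
  unfold Spec_parse_proposals_py parse_proposals_py parse_proposals_py_alt
  rw [(pvLoop_eq _).1]
  simp
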